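-- pv_equiv track=rewrite | github.com/credentum/veris-memory-core | src/validators/covenant_validator.py | _detect_token_contradiction
-- ===== SOURCE A (Python) =====
-- CONTRADICTION_SIGNALS = [
--     ("is", "is not"),
--     ("true", "false"),
--     ("enabled", "disabled"),
--     ("approved", "rejected"),
--     ("success", "failure"),
--     ("active", "inactive"),
--     ("valid", "invalid"),
--     ("yes", "no"),
-- ]
--
-- def _detect_token_contradiction(old_text: str, new_text: str) -> bool:
--     """
--     Fast check for contradicting keywords.
--
--     Args:
--         old_text: Text from existing memory
--         new_text: Text from new memory
--
--     Returns:
--         True if contradiction detected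
--     """
--     old_tokens = set(old_text.lower().split())
--     new_tokens = set(new_text.lower().split())
--
--     for pos, neg in CONTRADICTION_SIGNALS:
--         if pos in old_tokens and neg in new_tokens:
--             return True
--         if neg in old_tokens and pos in new_tokens:
--             return True
--
--     return False
-- ===== SOURCE B (Python) =====
-- CONTRADICTION_SIGNALS = [
--     ("is", "is not"),
--     ("true", "false"),
--     ("enabled", "disabled"),
--     ("approved", "rejected"),
--     ("success", "failure"),
--     ("active", "inactive"),
--     ("valid", "invalid"),
--     ("yes", "no"),
-- ]
--
-- _OPPOSITE = {}
-- for _pos, _neg in CONTRADICTION_SIGNALS: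
--     _OPPOSITE[_pos] = _neg
--     _OPPOSITE[_neg] = _pos
--
--
-- def _detect_token_contradiction(old_text: str, new_text: str) -> bool:
--     """Check for contradicting keywords via a precomputed opposite-token table."""
--     new_tokens = set(new_text.lower().split())
--     for token in set(old_text.lower().split()):
--         partner = _OPPOSITE.get(token)
--         if partner is not None and partner in new_tokens:
--             return True
--     return False
-- ===== Notes on version B (the rewrite author's own statement) =====
-- stated objective: idiomatic
-- what changed: B precomputes a bidirectional opposite-keyword dictionary once and loops over the old text's tokens with a single table lookup each, instead of scanning the fixed pair list with four set-membership tests per pair.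
import Mathlib
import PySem

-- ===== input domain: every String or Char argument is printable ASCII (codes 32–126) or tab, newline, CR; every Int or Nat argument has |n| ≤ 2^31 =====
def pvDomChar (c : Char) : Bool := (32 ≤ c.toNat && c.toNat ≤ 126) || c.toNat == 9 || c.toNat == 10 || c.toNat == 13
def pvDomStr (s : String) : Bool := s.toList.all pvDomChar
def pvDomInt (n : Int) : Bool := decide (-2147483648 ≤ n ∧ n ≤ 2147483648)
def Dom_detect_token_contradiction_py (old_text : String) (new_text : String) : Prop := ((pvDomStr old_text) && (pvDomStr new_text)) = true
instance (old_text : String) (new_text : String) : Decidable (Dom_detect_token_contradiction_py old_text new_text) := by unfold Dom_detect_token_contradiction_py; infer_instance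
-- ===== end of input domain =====

-- B replaces A's scan over the fixed pair list with a precomputed bidirectional opposite-token dictionary and a single pass over the old text's tokens (idiomatic lookup-table form).

-- ===== PORT A =====
def CONTRADICTION_SIGNALS : List (String × String) :=
  [("is", "is not"), ("true", "false"), ("enabled", "disabled"), ("approved", "rejected"),
   ("success", "failure"), ("active", "inactive"), ("valid", "invalid"), ("yes", "no")]

def detect_token_contradiction_py (old_text : String) (new_text : String) : Bool :=
  let old_tokens := PySem.Set.ofList (PySem.Str.split₀ (PySem.Str.lower old_text))
  let new_tokens := PySem.Set.ofList (PySem.Str.split₀ (PySem.Str.lower new_text))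
  CONTRADICTION_SIGNALS.any fun pn =>
    (PySem.Set.contains old_tokens pn.1 && PySem.Set.contains new_tokens pn.2) ||
    (PySem.Set.contains old_tokens pn.2 && PySem.Set.contains new_tokens pn.1)

-- ===== PORT B =====
-- Source B's module-level loop building the _OPPOSITE dict
def oppositeD : PySem.Dict String String :=
  CONTRADICTION_SIGNALS.foldl (fun d pn => (d.insert pn.1 pn.2).insert pn.2 pn.1) PySem.Dict.empty

def detect_token_contradiction_py_alt (old_text : String) (new_text : String) : Bool :=
  let new_tokens := PySem.Set.ofList (PySem.Str.split₀ (PySem.Str.lower new_text))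
  (PySem.Set.ofList (PySem.Str.split₀ (PySem.Str.lower old_text))).any fun token =>
    match PySem.Dict.get? oppositeD token with
    | some partner => PySem.Set.contains new_tokens partner
    | none => false

-- ===== PRECONDITION & SPEC =====
def Spec_detect_token_contradiction_py (old_text : String) (new_text : String) (out : Bool) : Prop := out = detect_token_contradiction_py_alt old_text new_text
instance (old_text : String) (new_text : String) (out : Bool) : Decidable (Spec_detect_token_contradiction_py old_text new_text out) := by unfold Spec_detect_token_contradiction_py; infer_instance

-- ===== CLAIM (what is proved, stated in full; the proofs are below) =====
def Claim_equal_detect_token_contradiction_py : Prop := ∀ (old_text : String) (new_text : String), Dom_detect_token_contradiction_py old_text new_text → Spec_detect_token_contradiction_py old_text new_text (detect_token_contradiction_py old_text new_text)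

-- ===== LEMMAS AND PROOFS =====

-- the _OPPOSITE dict written out as a literal association list
def oppositeL : List (String × String) :=
  [("is", "is not"), ("is not", "is"), ("true", "false"), ("false", "true"),
   ("enabled", "disabled"), ("disabled", "enabled"), ("approved", "rejected"),
   ("rejected", "approved"), ("success", "failure"), ("failure", "success"),
   ("active", "inactive"), ("inactive", "active"), ("valid", "invalid"),
   ("invalid", "valid"), ("yes", "no"), ("no", "yes")]

set_option maxHeartbeats 1000000 in
lemma oppositeD_eq : oppositeD = PySem.Dict.mk oppositeL := by decide

set_option maxHeartbeats 1000000 in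
lemma oppositeL_nodup : (oppositeL.map Prod.fst).Nodup := by decide

lemma get?_mk_eq_some_iff (L : List (String × String)) (hnd : (L.map Prod.fst).Nodup)
    (t q : String) : (PySem.Dict.mk L).get? t = some q ↔ (t, q) ∈ L := by
  induction L with
  | nil => simp [PySem.Dict.get?]
  | cons p rest ih =>
    obtain ⟨k, v⟩ := p
    simp only [List.map_cons, List.nodup_cons] at hnd
    rw [PySem.Dict.get?_mk_cons]
    by_cases hk : k = t
    · subst hk
      simp only [beq_self_eq_true, if_pos, Option.some.injEq, List.mem_cons, Prod.mk.injEq]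
      constructor
      · rintro rfl; exact Or.inl ⟨trivial, rfl⟩
      · rintro (⟨-, rfl⟩ | hmem)
        · rfl
        · exact absurd (List.mem_map_of_mem (f := Prod.fst) hmem) hnd.1
    · simp only [beq_iff_eq, if_neg hk, ih hnd.2, List.mem_cons, Prod.mk.injEq]
      constructor
      · exact Or.inr
      · rintro (⟨rfl, _⟩ | hmem)
        · exact absurd rfl hk
        · exact hmem

set_option maxHeartbeats 1000000 in
lemma oppositeD_get?_spec (t q : String) :
    PySem.Dict.get? oppositeD t = some q ↔
      ((t, q) ∈ CONTRADICTION_SIGNALS ∨ (q, t) ∈ CONTRADICTION_SIGNALS) := by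
  rw [oppositeD_eq, get?_mk_eq_some_iff _ oppositeL_nodup]
  simp only [oppositeL, CONTRADICTION_SIGNALS, List.mem_cons, List.not_mem_nil, or_false,
    Prod.mk.injEq]
  constructor
  · rintro (⟨rfl,rfl⟩|⟨rfl,rfl⟩|⟨rfl,rfl⟩|⟨rfl,rfl⟩|⟨rfl,rfl⟩|⟨rfl,rfl⟩|⟨rfl,rfl⟩|⟨rfl,rfl⟩|⟨rfl,rfl⟩|⟨rfl,rfl⟩|⟨rfl,rfl⟩|⟨rfl,rfl⟩|⟨rfl,rfl⟩|⟨rfl,rfl⟩|⟨rfl,rfl⟩|⟨rfl,rfl⟩) <;> decide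
  · rintro ((⟨rfl,rfl⟩|⟨rfl,rfl⟩|⟨rfl,rfl⟩|⟨rfl,rfl⟩|⟨rfl,rfl⟩|⟨rfl,rfl⟩|⟨rfl,rfl⟩|⟨rfl,rfl⟩)|(⟨rfl,rfl⟩|⟨rfl,rfl⟩|⟨rfl,rfl⟩|⟨rfl,rfl⟩|⟨rfl,rfl⟩|⟨rfl,rfl⟩|⟨rfl,rfl⟩|⟨rfl,rfl⟩)) <;> decide

lemma any_pairs_eq_any_tokens (o n : List String) :
    (CONTRADICTION_SIGNALS.any fun pn =>
      (PySem.Set.contains o pn.1 && PySem.Set.contains n pn.2) ||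
      (PySem.Set.contains o pn.2 && PySem.Set.contains n pn.1)) =
    (o.any fun token =>
      match PySem.Dict.get? oppositeD token with
      | some partner => PySem.Set.contains n partner
      | none => false) := by
  apply Bool.eq_iff_iff.mpr
  simp only [List.any_eq_true, Bool.or_eq_true, Bool.and_eq_true,
    PySem.Set.contains_eq_listContains, List.contains_iff_mem]
  constructor
  · rintro ⟨pn, hmem, ⟨ho, hn⟩ | ⟨ho, hn⟩⟩
    · exact ⟨pn.1, ho, by rw [(oppositeD_get?_spec pn.1 pn.2).mpr (Or.inl hmem)]; simpa using hn⟩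
    · exact ⟨pn.2, ho, by rw [(oppositeD_get?_spec pn.2 pn.1).mpr (Or.inr hmem)]; simpa using hn⟩
  · rintro ⟨t, ht, hg⟩
    rcases hget : PySem.Dict.get? oppositeD t with _ | q
    · rw [hget] at hg; simp at hg
    · rw [hget] at hg
      rcases (oppositeD_get?_spec t q).mp hget with hm | hm
      · exact ⟨(t, q), hm, Or.inl ⟨ht, by simpa using hg⟩⟩
      · exact ⟨(q, t), hm, Or.inr ⟨ht, by simpa using hg⟩⟩

-- ===== VERDICT (by name: the statement is the Claim_ definition above) =====
theorem detect_token_contradiction_py_spec : Claim_equal_detect_token_contradiction_py := by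
  intro old_text new_text _
  unfold Spec_detect_token_contradiction_py detect_token_contradiction_py detect_token_contradiction_py_alt
  exact any_pairs_eq_any_tokens _ _
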